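-- pv_equiv track=rewrite | github.com/aruaru0/python_myatcoder | ABC/abc454/d.py | check
-- ===== SOURCE A (Python) =====
-- def check(s):
--     ret = []
--     for c in s:
--         if len(ret) >= 3 and ret[-3] == '(' and ret[-2] == 'x' and ret[-1] == 'x' and c == ')':
--             ret.pop()
--             ret.pop()
--             ret.pop()
--             ret.append('x')
--             ret.append('x')
--         else:
--             ret.append(c)
--     return ret
-- ===== SOURCE B (Python) =====
-- def check(s):
--     # B: repeatedly rewrite every '(xx)' to 'xx' by global replacement until none remains,
--     # instead of A's single-pass stack reduction; confluence of the non-overlapping rule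
--     # gives the same normal form.
--     while '(xx)' in s:
--         s = s.replace('(xx)', 'xx')
--     return list(s)
-- ===== Notes on version B (the rewrite author's own statement) =====
-- stated objective: alternative
-- what changed: Replaced A's single-pass stack reduction (push characters, pop-and-rewrite on ')') by a fixpoint iteration of global substring replacement of the pattern with its two middle characters until no occurrence remains; the non-overlapping rewrite rule is confluent, so both reach the same normal form.
import Mathlib
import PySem

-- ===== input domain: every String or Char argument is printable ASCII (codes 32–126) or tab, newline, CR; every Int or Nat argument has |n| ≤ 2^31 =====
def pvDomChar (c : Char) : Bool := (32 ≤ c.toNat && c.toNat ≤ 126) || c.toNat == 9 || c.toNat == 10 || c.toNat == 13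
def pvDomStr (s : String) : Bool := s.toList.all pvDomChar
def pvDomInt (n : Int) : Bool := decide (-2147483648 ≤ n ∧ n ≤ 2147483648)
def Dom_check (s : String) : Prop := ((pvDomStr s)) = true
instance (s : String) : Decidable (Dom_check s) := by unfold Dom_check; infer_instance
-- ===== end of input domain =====

-- B replaces A's one-pass stack reduction by iterated global replacement of '(xx)' with 'xx'
-- until no occurrence remains (confluent rule, same normal form).

-- ===== PORT A =====
-- one loop-body step of A: the cascading pop/append rewrite, else a plain append
def checkStep (ret : List String) (c : Char) : List String :=
  if 3 ≤ ret.length ∧ PySem.List.pyGet? ret (-3) = some "(" ∧ PySem.List.pyGet? ret (-2) = some "x"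
      ∧ PySem.List.pyGet? ret (-1) = some "x" ∧ c = ')' then
    ((ret.dropLast.dropLast.dropLast ++ ["x"]) ++ ["x"])
  else ret ++ [c.toString]

def check (s : String) : List String := s.toList.foldl checkStep []

-- ===== PORT B =====
-- the 'while "(xx)" in s' loop; fuel = the initial length is enough, each replacement shrinks s
def checkAltLoop : Nat → String → String
  | 0, s => s
  | fuel + 1, s =>
      if PySem.Str.isIn "(xx)" s then checkAltLoop fuel (PySem.Str.replace s "(xx)" "xx") else s

def check_alt (s : String) : List String :=
  (checkAltLoop s.toList.length s).toList.map (fun c => c.toString)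

-- ===== PRECONDITION & SPEC =====
def Spec_check (s : String) (out : List String) : Prop := out = check_alt s
instance (s : String) (out : List String) : Decidable (Spec_check s out) := by unfold Spec_check; infer_instance

-- ===== CLAIM (what is proved, stated in full; the proofs are below) =====
def Claim_equal_check : Prop := ∀ (s : String), Dom_check s → Spec_check s (check s)

-- ===== LEMMAS AND PROOFS =====

-- the pattern, as a list of code points
def pvOld : List Char := ['(', 'x', 'x', ')']

-- proof-side characterisation of Python's non-overlapping left-to-right replace for this rule
def repAll : List Char → List Char
  | [] => []
  | c :: t => if pvOld.isPrefixOf (c :: t) then 'x' :: 'x' :: repAll (t.drop 3) else c :: repAll t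
termination_by l => l.length
decreasing_by
  all_goals simp

lemma go_eq_repAll (fuel : Nat) :
    ∀ (l acc : List Char), l.length ≤ fuel →
      PySem.Chars.replace.go pvOld ['x', 'x'] fuel l acc = acc.reverse ++ repAll l := by
  induction fuel with
  | zero =>
      intro l acc h
      have : l = [] := List.eq_nil_of_length_eq_zero (Nat.le_zero.mp h)
      subst this
      simp [PySem.Chars.replace.go, repAll]
  | succ n ih =>
      intro l acc h
      match l with
      | [] => simp [PySem.Chars.replace.go, repAll]
      | c :: t =>
          by_cases hp : pvOld.isPrefixOf (c :: t)
          · rw [PySem.Chars.replace.go]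
            simp only [hp, if_true]
            have hlen : (List.drop pvOld.length (c :: t)).length ≤ n := by
              simp [pvOld] at h ⊢; omega
            rw [ih _ _ hlen]
            have hdrop : List.drop pvOld.length (c :: t) = t.drop 3 := by
              simp [pvOld]
            rw [hdrop, repAll]
            simp [hp]
          · rw [PySem.Chars.replace.go]
            simp only [hp, Bool.false_eq_true, if_false]
            have hlen : t.length ≤ n := by simp at h; omega
            rw [ih _ _ hlen, repAll]
            simp [hp]

lemma replace_toList (s : String) :
    (PySem.Str.replace s "(xx)" "xx").toList = repAll s.toList := by
  rw [PySem.Str.toList_replace]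
  have h1 : ("(xx)".toList) = pvOld := by decide
  have h2 : ("xx".toList) = ['x', 'x'] := by decide
  rw [PySem.Chars.replace, h1, h2]
  rw [if_neg (by simp [pvOld])]
  rw [go_eq_repAll _ _ _ (le_refl _)]
  simp

lemma prefix_shape {c : Char} {t : List Char} (hp : pvOld.isPrefixOf (c :: t)) :
    c = '(' ∧ ∃ u, t = 'x' :: 'x' :: ')' :: u := by
  obtain ⟨u, hu⟩ := List.isPrefixOf_iff_prefix.mp hp
  have := hu.symm
  simp only [pvOld, List.cons_append, List.cons.injEq, List.nil_append] at this
  exact ⟨this.1, u, this.2⟩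

lemma repAll_length_aux (n : Nat) :
    ∀ l : List Char, l.length ≤ n →
      (repAll l).length ≤ l.length ∧ (pvOld <:+: l → (repAll l).length + 2 ≤ l.length) := by
  induction n with
  | zero =>
      intro l h
      have : l = [] := List.eq_nil_of_length_eq_zero (Nat.le_zero.mp h)
      subst this
      refine ⟨by simp [repAll], fun hin => ?_⟩
      have h4 : 4 ≤ ([] : List Char).length := List.IsInfix.length_le hin
      simp at h4
  | succ n ih =>
      intro l h
      match l with
      | [] =>
          refine ⟨by simp [repAll], fun hin => ?_⟩
          have h4 : 4 ≤ ([] : List Char).length := List.IsInfix.length_le hin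
          simp at h4
      | c :: t =>
          by_cases hp : pvOld.isPrefixOf (c :: t)
          · obtain ⟨hc, u, ht⟩ := prefix_shape hp
            have hd : t.drop 3 = u := by rw [ht]; rfl
            have hlt : t.length = u.length + 3 := by
              have := congrArg List.length ht; simpa using this
            have hlen : u.length ≤ n := by simp at h; omega
            have hu' := (ih u hlen).1
            rw [repAll]
            simp only [hp, if_true, hd]
            refine ⟨by simp; omega, fun _ => by simp; omega⟩
          · have hlen : t.length ≤ n := by simp at h; omega
            have ht := ih t hlen
            rw [repAll]
            simp only [hp, Bool.false_eq_true, if_false]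
            have ht1 := ht.1
            refine ⟨by simp; omega, fun hin => ?_⟩
            rcases List.infix_cons_iff.mp hin with hpre | hinf
            · exact absurd (List.isPrefixOf_iff_prefix.mpr hpre) hp
            · have := ht.2 hinf
              simp; omega

lemma repAll_length (l : List Char) :
    (repAll l).length ≤ l.length ∧ (pvOld <:+: l → (repAll l).length + 2 ≤ l.length) :=
  repAll_length_aux l.length l (le_refl _)

lemma ts_paren : ('(').toString = "(" := rfl
lemma ts_x : ('x').toString = "x" := rfl

-- checkStep on non-')' characters is a plain push
lemma checkStep_push (r : List String) (c : Char) (hc : c ≠ ')') :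
    checkStep r c = r ++ [c.toString] := by
  rw [checkStep, if_neg]
  intro h
  exact hc h.2.2.2.2

lemma pyGet?_append3 {α : Type} (v : List α) (a b c : α) :
    PySem.List.pyGet? (v ++ [a, b, c]) (-3) = some a
      ∧ PySem.List.pyGet? (v ++ [a, b, c]) (-2) = some b
      ∧ PySem.List.pyGet? (v ++ [a, b, c]) (-1) = some c := by
  refine ⟨?_, ?_, ?_⟩ <;> simp [PySem.List.pyGet?, PySem.List.pyIdx?]

-- checkStep fires on ')' after a pushed "(xx" and rewrites it to "xx"
lemma checkStep_fire (r : List String) :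
    checkStep (r ++ ["(", "x", "x"]) ')' = r ++ ["x", "x"] := by
  obtain ⟨h1, h2, h3⟩ := pyGet?_append3 r "(" "x" "x"
  rw [checkStep, if_pos]
  · have h : r ++ ["(", "x", "x"] = ((r ++ ["("]) ++ ["x"]) ++ ["x"] := by simp
    rw [h]
    simp
  · exact ⟨by simp, h1, h2, h3, rfl⟩

-- A's stack fold is invariant under one parallel replacement pass
lemma foldl_repAll_aux (n : Nat) :
    ∀ l : List Char, l.length ≤ n →
      ∀ r : List String, (repAll l).foldl checkStep r = l.foldl checkStep r := by
  induction n with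
  | zero =>
      intro l h r
      have : l = [] := List.eq_nil_of_length_eq_zero (Nat.le_zero.mp h)
      subst this; simp [repAll]
  | succ n ih =>
      intro l h r
      match l with
      | [] => simp [repAll]
      | c :: t =>
          by_cases hp : pvOld.isPrefixOf (c :: t)
          · obtain ⟨hc, u, ht⟩ := prefix_shape hp
            have hd : t.drop 3 = u := by rw [ht]; rfl
            have hlen : u.length ≤ n := by
              have := congrArg List.length ht; simp at h this; omega
            rw [repAll]
            simp only [hp, if_true, hd]
            subst hc; rw [ht]
            simp only [List.foldl_cons]
            rw [ih u hlen]
            congr 1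
            rw [checkStep_push r '(' (by decide), checkStep_push _ 'x' (by decide),
                checkStep_push _ 'x' (by decide), checkStep_push _ 'x' (by decide),
                checkStep_push _ 'x' (by decide)]
            have he : ((r ++ [('(').toString]) ++ [('x').toString]) ++ [('x').toString]
                = r ++ ["(", "x", "x"] := by rw [ts_paren, ts_x]; simp
            rw [he, checkStep_fire, ts_x]
            simp
          · have hlen : t.length ≤ n := by simp at h; omega
            rw [repAll]
            simp only [hp, Bool.false_eq_true, if_false, List.foldl_cons]
            exact ih t hlen _

lemma foldl_repAll (l : List Char) (r : List String) :
    (repAll l).foldl checkStep r = l.foldl checkStep r :=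
  foldl_repAll_aux l.length l (le_refl _) r

lemma exists_last_three {α : Type} (t : List α) (h : 3 ≤ t.length) :
    ∃ (u : List α) (a b c : α), t = u ++ [a, b, c] := by
  rcases hr : t.reverse with _ | ⟨c3, r1⟩
  · exfalso; have h2 := congrArg List.length hr
    rw [List.length_reverse] at h2; simp only [List.length_nil, List.length_cons] at h2; omega
  rcases r1 with _ | ⟨c2, r2⟩
  · exfalso; have h2 := congrArg List.length hr
    rw [List.length_reverse] at h2; simp only [List.length_nil, List.length_cons] at h2; omega
  rcases r2 with _ | ⟨c1, u⟩
  · exfalso; have h2 := congrArg List.length hr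
    rw [List.length_reverse] at h2; simp only [List.length_nil, List.length_cons] at h2; omega
  refine ⟨u.reverse, c1, c2, c3, ?_⟩
  have := congrArg List.reverse hr
  simpa using this

lemma char_toString_eq {c d : Char} (h : c.toString = d.toString) : c = d := by
  have := congrArg String.toList h
  simpa using this

-- on a pattern-free string A's stack never fires: it is the identity
lemma foldl_free (l : List Char) (h : ¬ pvOld <:+: l) :
    l.foldl checkStep [] = l.map (fun c => c.toString) := by
  induction l using List.reverseRecOn with
  | nil => rfl
  | append_singleton t c ih =>
      have hts : ¬ pvOld <:+: t := fun hin => h (hin.trans ⟨[], [c], by simp⟩)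
      rw [List.foldl_append, ih hts]
      simp only [List.foldl_cons, List.foldl_nil, List.map_append]
      rw [checkStep, if_neg]
      · simp
      · rintro ⟨h1, h2, h3, h4, h5⟩
        have hlen : 3 ≤ t.length := by simpa using h1
        obtain ⟨u, a, b, d, ht⟩ := exists_last_three t hlen
        have hm : t.map (fun c => c.toString)
            = u.map (fun c => c.toString) ++ [a.toString, b.toString, d.toString] := by
          rw [ht]; simp
        rw [hm] at h2 h3 h4
        obtain ⟨g1, g2, g3⟩ := pyGet?_append3 (u.map (fun c => c.toString)) a.toString b.toString d.toString
        have ha : a = '(' := char_toString_eq (by rw [g1] at h2; exact Option.some.inj h2)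
        have hb : b = 'x' := char_toString_eq (by rw [g2] at h3; exact Option.some.inj h3)
        have hd : d = 'x' := char_toString_eq (by rw [g3] at h4; exact Option.some.inj h4)
        apply h
        rw [ht, ha, hb, hd, h5]
        exact ⟨u, [], by simp [pvOld]⟩

-- the while-loop terminates inside the fuel on a pattern-free string, preserving A's fold
lemma loop_spec (fuel : Nat) :
    ∀ s : String, s.toList.length ≤ fuel + 1 →
      ¬ pvOld <:+: (checkAltLoop fuel s).toList
        ∧ (checkAltLoop fuel s).toList.foldl checkStep [] = s.toList.foldl checkStep [] := by
  induction fuel with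
  | zero =>
      intro s h
      show ¬ pvOld <:+: s.toList ∧ s.toList.foldl checkStep [] = s.toList.foldl checkStep []
      refine ⟨fun hin => ?_, rfl⟩
      have h4 : 4 ≤ s.toList.length := List.IsInfix.length_le hin
      omega
  | succ n ih =>
      intro s h
      rw [checkAltLoop]
      by_cases hIn : PySem.Str.isIn "(xx)" s
      · rw [if_pos hIn]
        have hin : pvOld <:+: s.toList := by
          have hi := (PySem.Str.isIn_iff_infix _ _).mp hIn
          have he : ("(xx)".toList) = pvOld := by decide
          rwa [he] at hi
        have hrep := replace_toList s
        have hlen : (PySem.Str.replace s "(xx)" "xx").toList.length ≤ n + 1 := by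
          rw [hrep]
          have h2 := (repAll_length s.toList).2 hin
          omega
        obtain ⟨hfree, hfold⟩ := ih _ hlen
        refine ⟨hfree, ?_⟩
        rw [hfold, hrep, foldl_repAll]
      · rw [if_neg hIn]
        refine ⟨fun hin => hIn ?_, rfl⟩
        rw [PySem.Str.isIn_iff_infix]
        have he : ("(xx)".toList) = pvOld := by decide
        rwa [he]

-- ===== VERDICT (by name: the statement is the Claim_ definition above) =====
theorem check_spec : Claim_equal_check := by
  intro s _
  unfold Spec_check check check_alt
  obtain ⟨hfree, hfold⟩ := loop_spec s.toList.length s (by omega)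
  rw [← hfold, foldl_free _ hfree]
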